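-- pv_equiv track=rewrite | github.com/hanlin2000/Automation | Automated_replay.py | dynamic_string_generator
-- ===== SOURCE A (Python) =====
-- import itertools
--
-- def dynamic_string_generator(custom_entries, length=1, infinity=False):
--     """
--     Yields combinations of strings:
--       - Uses a base set of elements made up of ascii_letters, digits, and custom_entries
--       - Generates all combinations of increasing length starting from min_length
--     """
--     # base_elements = list(custom_entries) + list(string.ascii_letters + string.digits)
--     base_elements = list(custom_entries)
--     if infinity:
--         curr_length = length
--         while True:
--             for combo in itertools.product(base_elements, repeat=curr_length):
--                 yield ''.join(combo)
--             curr_length += 1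
--     else:
--         fixed_length = length
--         for combo in itertools.product(base_elements, repeat=fixed_length):
--             yield ''.join(combo)
-- ===== SOURCE B (Python) =====
-- def dynamic_string_generator(custom_entries, length=1, infinity=False):
--     base = list(custom_entries)
--     if infinity:
--         curr_length = length
--         while True:
--             yield from _rank_block(base, curr_length)
--             curr_length += 1
--     else:
--         yield from _rank_block(base, length)
--
-- def _rank_block(base, n):
--     # Enumerate the n-letter words over `base` by decoding each rank
--     # m in range(k**n) into its base-k digit string (most significant first).
--     if n < 0:
--         raise ValueError("repeat must be non-negative")
--     if n == 0:
--         yield ''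
--         return
--     k = len(base)
--     if k == 0:
--         return
--     for m in range(k ** n):
--         digits = []
--         x = m
--         for _ in range(n):
--             digits.append(base[x % k])
--             x //= k
--         yield ''.join(reversed(digits))
-- ===== Notes on version B (the rewrite author's own statement) =====
-- stated objective: alternative
-- what changed: Replaces the itertools.product iterator with rank decoding: each output index m in range(k**n) is converted directly to its base-k digit string, instead of extending tuple prefixes via a cartesian-product iterator.
import Mathlib
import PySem

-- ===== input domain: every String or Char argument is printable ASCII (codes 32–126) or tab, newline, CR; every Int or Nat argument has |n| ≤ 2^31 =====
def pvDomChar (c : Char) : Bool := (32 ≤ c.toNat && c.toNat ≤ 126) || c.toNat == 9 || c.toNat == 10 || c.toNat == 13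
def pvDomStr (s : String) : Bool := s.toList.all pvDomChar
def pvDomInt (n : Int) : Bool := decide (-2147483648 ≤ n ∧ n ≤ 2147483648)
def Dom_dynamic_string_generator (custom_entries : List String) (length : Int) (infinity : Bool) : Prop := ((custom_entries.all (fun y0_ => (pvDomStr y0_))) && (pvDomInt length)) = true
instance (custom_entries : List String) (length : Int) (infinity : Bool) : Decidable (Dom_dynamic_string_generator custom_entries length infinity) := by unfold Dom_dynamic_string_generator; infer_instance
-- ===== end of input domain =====

-- B replaces the itertools.product iterator with direct base-k rank decoding of each
-- output index; same cost, genuinely different enumeration mechanism ("alternative").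
-- Both Pythons are generators; the ports return the (finite) list of yielded strings.

-- ===== PORT A =====
-- itertools.product(base, repeat=n), transliterated per its documented equivalent:
-- tuples of length n, rightmost position varying fastest.
def pvProdT (base : List String) : Nat → List (List String)
  | 0 => [[]]
  | n+1 => (pvProdT base n).flatMap (fun t => base.map (fun e => t ++ [e]))

def dynamic_string_generator (custom_entries : List String) (length : Int) (infinity : Bool) : List String :=
  -- infinity=True never returns and length<0 raises ValueError in Python; both are
  -- excluded by Pre_, the port returns [] there only to be total.
  if infinity then []
  else if length < 0 then []
  else (pvProdT custom_entries length.toNat).map String.join   -- ''.join(combo) for each tuple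

-- ===== PORT B =====
def pvRankBlock (base : List String) (n : Nat) : List String :=
  if n = 0 then [""]
  else if base.length = 0 then []
  else (List.range (base.length ^ n)).map (fun m =>
    -- inner loop: n divmod steps collecting digits least-significant first, then reverse
    let st := (List.range n).foldl
      (fun (st : List String × Nat) _ =>
        (st.1 ++ [base.getD (st.2 % base.length) ""], st.2 / base.length)) ([], m)
    String.join st.1.reverse)

def dynamic_string_generator_alt (custom_entries : List String) (length : Int) (infinity : Bool) : List String :=
  -- same totalisation of the excluded inputs as port A
  if infinity then []
  else if length < 0 then []
  else pvRankBlock custom_entries length.toNat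

-- ===== PRECONDITION & SPEC =====
-- Pre_ excludes infinity=True (the Python generators never finish, so list() diverges)
-- and negative length (itertools.product raises ValueError, B raises ValueError too).
def Pre_dynamic_string_generator (custom_entries : List String) (length : Int) (infinity : Bool) : Prop :=
  infinity = false ∧ 0 ≤ length
instance (custom_entries : List String) (length : Int) (infinity : Bool) : Decidable (Pre_dynamic_string_generator custom_entries length infinity) := by unfold Pre_dynamic_string_generator; infer_instance
def pvWitness_dynamic_string_generator : List String × Int × Bool := (["a", "b"], 2, false)

def Spec_dynamic_string_generator (custom_entries : List String) (length : Int) (infinity : Bool) (out : List String) : Prop := out = dynamic_string_generator_alt custom_entries length infinity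
instance (custom_entries : List String) (length : Int) (infinity : Bool) (out : List String) : Decidable (Spec_dynamic_string_generator custom_entries length infinity out) := by unfold Spec_dynamic_string_generator; infer_instance

-- ===== CLAIM (what is proved, stated in full; the proofs are below) =====
def Claim_equal_dynamic_string_generator : Prop := ∀ (custom_entries : List String) (length : Int) (infinity : Bool), Dom_dynamic_string_generator custom_entries length infinity → Pre_dynamic_string_generator custom_entries length infinity → Spec_dynamic_string_generator custom_entries length infinity (dynamic_string_generator custom_entries length infinity)

-- ===== LEMMAS AND PROOFS =====

-- digits of x in base k = base.length, least significant first, as base elements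
def pvDigits (base : List String) : Nat → Nat → List String
  | 0, _ => []
  | n+1, x => base.getD (x % base.length) "" :: pvDigits base n (x / base.length)

-- the decoded word of rank m among the n-letter words
def pvDec (base : List String) (n m : Nat) : String :=
  String.join (pvDigits base n m).reverse

theorem pv_foldl_ignore {α : Type} (g : α → α) (n : Nat) (i : α) :
    List.foldl (fun s _ => g s) i (List.range n) = g^[n] i := by
  induction n with
  | zero => simp
  | succ n ih => simp [List.range_succ, List.foldl_append, ih, Function.iterate_succ_apply']

theorem pv_step_iter (base : List String) (n : Nat) :
    ∀ (acc : List String) (x : Nat),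
    (fun (st : List String × Nat) =>
        (st.1 ++ [base.getD (st.2 % base.length) ""], st.2 / base.length))^[n] (acc, x)
      = (acc ++ pvDigits base n x, x / base.length ^ n) := by
  induction n with
  | zero => intro acc x; simp [pvDigits]
  | succ n ih =>
    intro acc x
    rw [Function.iterate_succ_apply, ih]
    simp [pvDigits, Nat.div_div_eq_div_mul, pow_succ']

theorem pv_join_append_singleton (L : List String) (d : String) :
    String.join (L ++ [d]) = String.join L ++ d := by
  simp [String.join, List.foldl_append]

theorem pv_dec_succ (base : List String) (n m : Nat) :
    pvDec base (n+1) m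
      = pvDec base n (m / base.length) ++ base.getD (m % base.length) "" := by
  simp [pvDec, pvDigits, pv_join_append_singleton]

theorem pv_range_mul (a b : Nat) :
    List.range (a * b)
      = (List.range a).flatMap (fun q => (List.range b).map (fun r => q * b + r)) := by
  induction a with
  | zero => simp
  | succ a ih =>
    rw [Nat.succ_mul, List.range_add, ih, List.range_succ, List.flatMap_append]
    simp

theorem pv_map_eq_range_getD (base : List String) (g : String → String) :
    base.map g = (List.range base.length).map (fun i => g (base.getD i "")) := by
  apply List.ext_getElem
  · simp
  · intro i h1 h2
    simp at h1
    simp [List.getD_eq_getElem?_getD, List.getElem?_eq_getElem h1]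

theorem pv_prodT_nil (n : Nat) : pvProdT [] (n+1) = [] := by
  induction n with
  | zero => simp [pvProdT]
  | succ n _ => simp [pvProdT]

theorem pv_main (base : List String) (n : Nat) :
    (pvProdT base n).map String.join
      = (List.range (base.length ^ n)).map (pvDec base n) := by
  induction n with
  | zero => simp [pvProdT, pvDec, pvDigits, String.join]
  | succ n ih =>
    have lhs :
        (pvProdT base (n+1)).map String.join
          = (List.range (base.length ^ n)).flatMap
              (fun q => base.map (fun e => pvDec base n q ++ e)) := by
      rw [pvProdT, List.map_flatMap]
      have : (fun t => List.map String.join (base.map fun e => t ++ [e]))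
           = (fun t => base.map (fun e => String.join t ++ e)) := by
        funext t
        simp [List.map_map, Function.comp_def, pv_join_append_singleton]
      rw [this]
      have h2 : (pvProdT base n).flatMap (fun t => base.map (fun e => String.join t ++ e))
          = ((pvProdT base n).map String.join).flatMap
              (fun s => base.map (fun e => s ++ e)) := by
        rw [List.flatMap_map]
      rw [h2, ih, List.flatMap_map]
    rw [lhs, pow_succ, pv_range_mul, List.map_flatMap]
    apply List.flatMap_congr
    intro q _
    rw [List.map_map]
    rw [pv_map_eq_range_getD base (fun e => pvDec base n q ++ e)]
    apply List.map_congr_left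
    intro r hr
    simp only [List.mem_range] at hr
    simp only [Function.comp_def]
    rw [pv_dec_succ]
    have hdiv : (q * base.length + r) / base.length = q := by
      rw [Nat.mul_comm, Nat.mul_add_div (by omega), Nat.div_eq_of_lt hr]; omega
    have hmod : (q * base.length + r) % base.length = r := by
      rw [Nat.add_comm, Nat.add_mul_mod_self_right, Nat.mod_eq_of_lt hr]
    rw [hdiv, hmod]

theorem pv_rank_eq (base : List String) (n : Nat) :
    (pvProdT base n).map String.join = pvRankBlock base n := by
  unfold pvRankBlock
  rcases Nat.eq_zero_or_pos n with h | h
  · subst h; simp [pvProdT, String.join]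
  · obtain ⟨m, rfl⟩ := Nat.exists_eq_add_of_lt h
    simp only [Nat.zero_add] at *
    by_cases hb : base.length = 0
    · have : base = [] := List.length_eq_zero_iff.mp hb
      subst this
      simp [pv_prodT_nil, hb]
    · rw [if_neg (by omega), if_neg hb, pv_main]
      apply List.map_congr_left
      intro x _
      rw [pv_foldl_ignore, pv_step_iter]
      simp [pvDec]

-- ===== VERDICT (by name: the statement is the Claim_ definition above) =====
theorem dynamic_string_generator_spec : Claim_equal_dynamic_string_generator := by
  intro ce len inf _ hpre
  obtain ⟨hinf, hlen⟩ := hpre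
  unfold Spec_dynamic_string_generator dynamic_string_generator dynamic_string_generator_alt
  subst hinf
  simp only [if_false, Bool.false_eq_true]
  rw [if_neg (by omega), if_neg (by omega), pv_rank_eq]
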